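-- pv_equiv track=rewrite | github.com/kpraays/basic-codes | basic_2.py | odd_even_swap
-- ===== SOURCE A (Python) =====
-- def get_odd_even_lists(S1, S2):
--     even_pos_S2 = []
--     odd_pos_S2 = []
--     even_pos_S1 = []
--     odd_pos_S1 = []
--
--     for i in range(len(S1)):
--         if (i+1)%2 == 0:
--             # even position
--             even_pos_S1.append(S1[i])
--         elif (i+1)%2 != 0:
--             # odd position
--             odd_pos_S1.append(S1[i])
--
--     for i in range(len(S2)):
--         if (i+1)%2 == 0:
--             # even position
--             even_pos_S2.append(S2[i])
--         elif (i+1)%2 != 0: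
--             # odd position
--             odd_pos_S2.append(S2[i])
--     return even_pos_S1, odd_pos_S1, even_pos_S2, odd_pos_S2
--
-- def odd_even_swap(S1, S2):
--     even_pos_S1, odd_pos_S1, even_pos_S2, odd_pos_S2 = get_odd_even_lists(S1, S2)
--     output_string = ""
--
--     for i in range(len(S1)):
--         if (i+1)%2 != 0:
--             # odd position
--             if even_pos_S2:
--                 output_string += even_pos_S2[0]
--                 del even_pos_S2[0]
--             elif not even_pos_S2: # even_pos_S2 is empty
--                 output_string += S1[i]
--
--         elif (i + 1) % 2 == 0:
--             # even position
--                 if odd_pos_S2: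
--                     output_string += odd_pos_S2[0]
--                     del odd_pos_S2[0]
--                 elif not odd_pos_S2: #odd_pos_S2 is empty
--                     output_string += S1[i]
--
--     return output_string
-- ===== SOURCE B (Python) =====
-- def odd_even_swap(S1, S2):
--     n2 = len(S2)
--     chars = []
--     for i in range(len(S1)):
--         j = i + 1 if i % 2 == 0 else i - 1
--         chars.append(S2[j] if j < n2 else S1[i])
--     return "".join(chars)
-- ===== Notes on version B (the rewrite author's own statement) =====
-- stated objective: faster
-- what changed: B replaces A's four partition lists and front-pop FIFO consumption with a single pass that computes each position's partner index j (i+1 for even i, i-1 for odd i) and takes S2[j] when j < len(S2), else S1[i].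
import Mathlib
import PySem

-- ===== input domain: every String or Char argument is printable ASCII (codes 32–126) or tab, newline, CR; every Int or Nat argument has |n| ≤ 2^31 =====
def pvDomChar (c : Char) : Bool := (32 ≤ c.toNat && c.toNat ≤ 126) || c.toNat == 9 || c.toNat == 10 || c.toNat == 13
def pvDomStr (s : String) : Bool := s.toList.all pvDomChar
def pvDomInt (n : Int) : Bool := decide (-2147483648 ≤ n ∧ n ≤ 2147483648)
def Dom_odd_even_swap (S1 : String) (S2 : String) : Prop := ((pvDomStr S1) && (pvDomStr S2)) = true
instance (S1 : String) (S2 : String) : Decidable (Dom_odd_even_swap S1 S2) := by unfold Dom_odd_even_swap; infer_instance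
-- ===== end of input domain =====

-- ===== PORT A =====
-- Header: B replaces A's four partition lists and front-pop FIFO consumption by direct
-- index arithmetic (partner index j, fallback S1[i]); objective: simpler, one pass.

-- port of get_odd_even_lists' per-string loop: scan indices, append to (even_pos, odd_pos)
def pvGOE (l : List Char) : List Char × List Char :=
  (List.range l.length).foldl
    (fun p i =>
      if (i + 1) % 2 = 0 then (p.1 ++ [l.getD i ' '], p.2)
      else (p.1, p.2 ++ [l.getD i ' ']))
    ([], [])

-- port of get_odd_even_lists (two loops, four lists)
def getOddEvenLists (S1 : String) (S2 : String) :
    List Char × List Char × List Char × List Char :=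
  let p1 := pvGOE S1.toList
  let p2 := pvGOE S2.toList
  (p1.1, p1.2, p2.1, p2.2)

def odd_even_swap (S1 : String) (S2 : String) : String :=
  let l1 := S1.toList
  let q := getOddEvenLists S1 S2
  let s :=
    (List.range l1.length).foldl
      (fun (st : List Char × List Char × List Char) i =>
        if (i + 1) % 2 ≠ 0 then
          match st.2.1 with
          | c :: rest => (st.1 ++ [c], rest, st.2.2)
          | [] => (st.1 ++ [l1.getD i ' '], [], st.2.2)
        else
          match st.2.2 with
          | c :: rest => (st.1 ++ [c], st.2.1, rest)
          | [] => (st.1 ++ [l1.getD i ' '], st.2.1, []))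
      ([], q.2.2.1, q.2.2.2)
  String.mk s.1

-- ===== PORT B =====
def odd_even_swap_alt (S1 : String) (S2 : String) : String :=
  let l1 := S1.toList
  let l2 := S2.toList
  String.mk ((List.range l1.length).map (fun i =>
    let j := if i % 2 = 0 then i + 1 else i - 1
    if j < l2.length then l2.getD j ' ' else l1.getD i ' '))

-- ===== PRECONDITION & SPEC =====
def Spec_odd_even_swap (S1 : String) (S2 : String) (out : String) : Prop := out = odd_even_swap_alt S1 S2
instance (S1 : String) (S2 : String) (out : String) : Decidable (Spec_odd_even_swap S1 S2 out) := by unfold Spec_odd_even_swap; infer_instance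

-- ===== CLAIM (what is proved, stated in full; the proofs are below) =====
def Claim_equal_odd_even_swap : Prop := ∀ (S1 : String) (S2 : String), Dom_odd_even_swap S1 S2 → Spec_odd_even_swap S1 S2 (odd_even_swap S1 S2)

-- ===== LEMMAS AND PROOFS =====

-- structural characterisations of the partition lists
def pvEvens : List Char → List Char
  | [] => []
  | [a] => [a]
  | a :: _ :: r => a :: pvEvens r

def pvOdds : List Char → List Char
  | [] => []
  | [_] => []
  | _ :: b :: r => b :: pvOdds r

theorem pvEvens_append (xs : List Char) (x : Char) :
    pvEvens (xs ++ [x]) = pvEvens xs ++ (if xs.length % 2 = 0 then [x] else []) := by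
  fun_induction pvEvens xs with
  | case1 => simp [pvEvens]
  | case2 a => simp [pvEvens]
  | case3 a b r ih =>
      by_cases h : r.length % 2 = 0
      · have h2 : (a :: b :: r).length % 2 = 0 := by simp; omega
        simp [pvEvens, ih, h]; omega
      · have h2 : ¬ (a :: b :: r).length % 2 = 0 := by simp; omega
        simp [pvEvens, ih, h]; omega

theorem pvOdds_append (xs : List Char) (x : Char) :
    pvOdds (xs ++ [x]) = pvOdds xs ++ (if xs.length % 2 = 1 then [x] else []) := by
  fun_induction pvOdds xs with
  | case1 => simp [pvOdds]
  | case2 a => simp [pvOdds]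
  | case3 a b r ih =>
      by_cases h : r.length % 2 = 1
      · have h2 : (a :: b :: r).length % 2 = 1 := by simp; omega
        simp [pvOdds, ih, h]; omega
      · have h2 : ¬ (a :: b :: r).length % 2 = 1 := by simp; omega
        simp [pvOdds, ih, h]; omega

theorem pvEvens_length (l : List Char) : (pvEvens l).length = (l.length + 1) / 2 := by
  fun_induction pvEvens l with
  | case1 => simp [pvEvens]
  | case2 a => simp [pvEvens]
  | case3 a b r ih => simp [pvEvens, ih]; omega

theorem pvOdds_length (l : List Char) : (pvOdds l).length = l.length / 2 := by
  fun_induction pvOdds l with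
  | case1 => simp [pvOdds]
  | case2 a => simp [pvOdds]
  | case3 a b r ih => simp [pvOdds, ih]; omega

theorem pvEvens_getElem? (l : List Char) (k : Nat) :
    (pvEvens l)[k]? = l[2 * k]? := by
  fun_induction pvEvens l generalizing k with
  | case1 => simp
  | case2 a => cases k with
      | zero => simp
      | succ m => simp
  | case3 a b r ih =>
      cases k with
      | zero => simp
      | succ m =>
        have h2 : 2 * (m + 1) = (2 * m) + 1 + 1 := by omega
        rw [h2]
        simpa using ih m

theorem pvOdds_getElem? (l : List Char) (k : Nat) :
    (pvOdds l)[k]? = l[2 * k + 1]? := by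
  fun_induction pvOdds l generalizing k with
  | case1 => simp
  | case2 a => cases k with
      | zero => simp
      | succ m => simp
  | case3 a b r ih =>
      cases k with
      | zero => simp
      | succ m =>
        have h2 : 2 * (m + 1) + 1 = (2 * m + 1) + 1 + 1 := by omega
        rw [h2]
        simpa using ih m

theorem pvEvens_getD (l : List Char) (k : Nat) (d : Char) :
    (pvEvens l).getD k d = l.getD (2 * k) d := by
  simp [List.getD, pvEvens_getElem?]

theorem pvOdds_getD (l : List Char) (k : Nat) (d : Char) :
    (pvOdds l).getD k d = l.getD (2 * k + 1) d := by
  simp [List.getD, pvOdds_getElem?]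

-- pvGOE computes (odd-index chars, even-index chars)
theorem pvGOE_eq (l : List Char) : pvGOE l = (pvOdds l, pvEvens l) := by
  have key : ∀ k, k ≤ l.length →
      (List.range k).foldl
        (fun p i =>
          if (i + 1) % 2 = 0 then (p.1 ++ [l.getD i ' '], p.2)
          else (p.1, p.2 ++ [l.getD i ' ']))
        ([], []) = (pvOdds (l.take k), pvEvens (l.take k)) := by
    intro k hk
    induction k with
    | zero => simp [pvOdds, pvEvens]
    | succ m ih =>
      have hm : m ≤ l.length := by omega
      have hlt : m < l.length := by omega
      have htake : l.take (m + 1) = l.take m ++ [l.getD m ' '] := by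
        rw [List.take_succ]
        simp [List.getD, List.getElem?_eq_getElem hlt]
      have hlen : (l.take m).length = m := by simp; omega
      rw [List.range_succ, List.foldl_append, ih hm]
      simp only [List.foldl_cons, List.foldl_nil, htake, pvOdds_append, pvEvens_append, hlen]
      by_cases hp : m % 2 = 0
      · have h1 : ¬ (m + 1) % 2 = 0 := by omega
        have h3 : ¬ m % 2 = 1 := by omega
        simp [h1, hp, h3]
      · have h1 : (m + 1) % 2 = 0 := by omega
        have h3 : m % 2 = 1 := by omega
        simp [h1, hp, h3]
  have := key l.length (le_refl _)
  simpa [pvGOE] using this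

-- the body of B's map
def pvG (l1 l2 : List Char) (i : Nat) : Char :=
  let j := if i % 2 = 0 then i + 1 else i - 1
  if j < l2.length then l2.getD j ' ' else l1.getD i ' '

-- loop invariant for A's main loop
theorem loopA_inv (l1 l2 : List Char) (k : Nat) :
    (List.range k).foldl
      (fun (st : List Char × List Char × List Char) i =>
        if (i + 1) % 2 ≠ 0 then
          match st.2.1 with
          | c :: rest => (st.1 ++ [c], rest, st.2.2)
          | [] => (st.1 ++ [l1.getD i ' '], [], st.2.2)
        else
          match st.2.2 with
          | c :: rest => (st.1 ++ [c], st.2.1, rest)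
          | [] => (st.1 ++ [l1.getD i ' '], st.2.1, []))
      ([], pvOdds l2, pvEvens l2)
    = ((List.range k).map (pvG l1 l2),
       (pvOdds l2).drop ((k + 1) / 2), (pvEvens l2).drop (k / 2)) := by
  induction k with
  | zero => simp
  | succ m ih =>
    rw [List.range_succ, List.foldl_append, ih]
    simp only [List.foldl_cons, List.foldl_nil, List.map_append, List.map_cons, List.map_nil]
    by_cases h0 : m % 2 = 0
    · -- m even: branch (m+1)%2 ≠ 0 holds, consume head of the odds list
      have hb : (m + 1) % 2 ≠ 0 := by omega
      have hd : (m + 1) / 2 = m / 2 := by omega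
      by_cases hlt : m / 2 < (pvOdds l2).length
      · have hdrop := List.drop_eq_getElem_cons hlt
        have hget : (pvOdds l2)[m / 2] = (pvOdds l2).getD (m / 2) ' ' := by
          simp [List.getD, List.getElem?_eq_getElem hlt]
        have harith : 2 * (m / 2) + 1 = m + 1 := by omega
        have hcond : m + 1 < l2.length := by
          have := pvOdds_length l2; omega
        have hgfun : pvG l1 l2 m = l2.getD (m + 1) ' ' := by
          simp [pvG, h0, hcond]
        have hd2 : m / 2 + 1 = (m + 1 + 1) / 2 := by omega
        rw [hd, hdrop]
        simp only [hb, if_true, eq_self_iff_true, ne_eq, not_false_eq_true, if_pos]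
        rw [hget, pvOdds_getD, harith, hd2, hgfun]
      · have hdrop : (pvOdds l2).drop (m / 2) = [] := by
          simp [List.drop_eq_nil_iff]; omega
        have hcond : ¬ (m + 1 < l2.length) := by
          have := pvOdds_length l2; omega
        have hgfun : pvG l1 l2 m = l1.getD m ' ' := by
          simp [pvG, h0, hcond]
        have hdrop2 : (pvOdds l2).drop ((m + 1 + 1) / 2) = [] := by
          simp [List.drop_eq_nil_iff]; omega
        rw [hd, hdrop]
        simp [hb, hgfun, hdrop2, hd]
    · -- m odd: branch (m+1)%2 ≠ 0 fails, consume head of the evens list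
      have hb : (m + 1) % 2 = 0 := by omega
      have hd : (m + 1 + 1) / 2 = (m + 1) / 2 := by omega
      by_cases hlt : m / 2 < (pvEvens l2).length
      · have hdrop := List.drop_eq_getElem_cons hlt
        have hget : (pvEvens l2)[m / 2] = (pvEvens l2).getD (m / 2) ' ' := by
          simp [List.getD, List.getElem?_eq_getElem hlt]
        have harith : 2 * (m / 2) = m - 1 := by omega
        have hcond : m - 1 < l2.length := by
          have := pvEvens_length l2; omega
        have hgfun : pvG l1 l2 m = l2.getD (m - 1) ' ' := by
          simp [pvG, h0, hcond]
        have hd3 : m / 2 + 1 = (m + 1) / 2 := by omega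
        rw [hdrop]
        simp only [hb, ne_eq, not_true_eq_false, if_false, ite_false, not_not]
        rw [hget, pvEvens_getD, harith, hd3, hgfun]
        simp [hb, hd]
      · have hdrop : (pvEvens l2).drop (m / 2) = [] := by
          simp [List.drop_eq_nil_iff]; omega
        have hcond : ¬ (m - 1 < l2.length) := by
          have := pvEvens_length l2; omega
        have hgfun : pvG l1 l2 m = l1.getD m ' ' := by
          simp [pvG, h0, hcond]
        have hdrop2 : (pvEvens l2).drop ((m + 1) / 2) = [] := by
          simp [List.drop_eq_nil_iff]; omega
        rw [hdrop]
        simp [hb, hgfun, hdrop2, hd]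

-- ===== VERDICT (by name: the statement is the Claim_ definition above) =====
theorem odd_even_swap_spec : Claim_equal_odd_even_swap := by
  intro S1 S2 _
  show odd_even_swap S1 S2 = odd_even_swap_alt S1 S2
  unfold odd_even_swap odd_even_swap_alt getOddEvenLists
  simp only [pvGOE_eq]
  rw [loopA_inv S1.toList S2.toList S1.toList.length]
  refine congrArg String.mk (List.map_congr_left ?_)
  intro i _
  simp [pvG]
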